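-- pv_equiv track=rewrite | github.com/ashioyajotham/web_research_agent | agent.py | _extract_code_requirements
-- ===== SOURCE A (Python) =====
-- def _extract_code_requirements(task: str) -> str:
--     """Extract key requirements from coding task"""
--     requirements = []
--     task_lower = task.lower()
--
--     # Algorithm type requirements
--     if "mcts" in task_lower or "monte carlo tree search" in task_lower:
--         requirements.extend([
--             "Implement Monte Carlo Tree Search with selection, expansion, simulation, and backpropagation phases",
--             "Include node class with visit counts and value statistics",
--             "Support customizable simulation count and exploration parameter"
--         ])
--     elif "minimax" in task_lower:
--         requirements.extend([
--             "Implement Minimax algorithm with alpha-beta pruning",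
--             "Support customizable search depth",
--             "Include evaluation function"
--         ])
--
--     # Game/problem specific requirements
--     if "tic-tac-toe" in task_lower:
--         requirements.extend([
--             "Implement game state representation",
--             "Include move validation",
--             "Support both human and AI players",
--             "Provide win condition checking"
--         ])
--
--     # General coding requirements
--     requirements.extend([
--         "Use object-oriented design where appropriate",
--         "Include comprehensive error handling",
--         "Add type hints and documentation"
--     ])
--
--     return "\n".join(f"- {req}" for req in requirements)
-- ===== SOURCE B (Python) =====
-- # B precomputes the six possible complete outputs once; each call only classifies
-- # the task into an (algorithm, game) code and returns the precomputed string.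
-- _MCTS = [
--     "Implement Monte Carlo Tree Search with selection, expansion, simulation, and backpropagation phases",
--     "Include node class with visit counts and value statistics",
--     "Support customizable simulation count and exploration parameter",
-- ]
-- _MINIMAX = [
--     "Implement Minimax algorithm with alpha-beta pruning",
--     "Support customizable search depth",
--     "Include evaluation function",
-- ]
-- _TTT = [
--     "Implement game state representation",
--     "Include move validation",
--     "Support both human and AI players",
--     "Provide win condition checking",
-- ]
-- _GENERAL = [
--     "Use object-oriented design where appropriate",
--     "Include comprehensive error handling",
--     "Add type hints and documentation",
-- ]
--
-- _TABLE = [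
--     ["\n".join("- " + r for r in a + g + _GENERAL) for g in ([], _TTT)]
--     for a in ([], _MCTS, _MINIMAX)
-- ]
--
--
-- def _extract_code_requirements(task: str) -> str:
--     t = task.lower()
--     a = 1 if ("mcts" in t or "monte carlo tree search" in t) else 2 if "minimax" in t else 0
--     g = 1 if "tic-tac-toe" in t else 0
--     return _TABLE[a][g]
-- ===== Notes on version B (the rewrite author's own statement) =====
-- stated objective: alternative
-- what changed: Instead of assembling a requirement list per call and joining it, B precomputes the six possible complete output strings in a 3x2 table and each call only computes an (algorithm, game) index pair and looks the answer up.
import Mathlib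
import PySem

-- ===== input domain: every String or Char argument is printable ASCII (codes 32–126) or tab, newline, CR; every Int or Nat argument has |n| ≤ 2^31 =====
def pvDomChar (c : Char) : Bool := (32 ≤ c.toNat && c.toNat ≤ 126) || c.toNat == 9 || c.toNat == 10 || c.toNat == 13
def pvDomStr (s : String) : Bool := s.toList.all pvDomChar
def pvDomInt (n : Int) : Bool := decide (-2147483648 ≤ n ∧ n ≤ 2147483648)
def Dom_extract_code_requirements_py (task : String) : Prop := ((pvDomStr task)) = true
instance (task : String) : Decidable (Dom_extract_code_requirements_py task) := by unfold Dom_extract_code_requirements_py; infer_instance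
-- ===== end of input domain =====

-- B precomputes the six possible complete outputs in a 3x2 table; each call only classifies the task into an (algorithm, game) index (alternative decomposition; same cost).

-- ===== PORT A =====
def extract_code_requirements_py (task : String) : String :=
  let task_lower := PySem.Str.lower task
  let requirements : List String := []
  let requirements :=
    if PySem.Str.isIn "mcts" task_lower || PySem.Str.isIn "monte carlo tree search" task_lower then
      requirements ++ [
        "Implement Monte Carlo Tree Search with selection, expansion, simulation, and backpropagation phases",
        "Include node class with visit counts and value statistics",
        "Support customizable simulation count and exploration parameter"]
    else if PySem.Str.isIn "minimax" task_lower then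
      requirements ++ [
        "Implement Minimax algorithm with alpha-beta pruning",
        "Support customizable search depth",
        "Include evaluation function"]
    else requirements
  let requirements :=
    if PySem.Str.isIn "tic-tac-toe" task_lower then
      requirements ++ [
        "Implement game state representation",
        "Include move validation",
        "Support both human and AI players",
        "Provide win condition checking"]
    else requirements
  let requirements := requirements ++ [
        "Use object-oriented design where appropriate",
        "Include comprehensive error handling",
        "Add type hints and documentation"]
  PySem.Str.join "\n" (requirements.map (fun req => "- " ++ req))

-- ===== PORT B =====
def pvMcts : List String := [
  "Implement Monte Carlo Tree Search with selection, expansion, simulation, and backpropagation phases",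
  "Include node class with visit counts and value statistics",
  "Support customizable simulation count and exploration parameter"]

def pvMinimax : List String := [
  "Implement Minimax algorithm with alpha-beta pruning",
  "Support customizable search depth",
  "Include evaluation function"]

def pvTtt : List String := [
  "Implement game state representation",
  "Include move validation",
  "Support both human and AI players",
  "Provide win condition checking"]

def pvGeneral : List String := [
  "Use object-oriented design where appropriate",
  "Include comprehensive error handling",
  "Add type hints and documentation"]

-- the module-level precomputed 3x2 table of complete outputs
def pvTable : List (List String) :=
  ([], pvMcts, pvMinimax) |> fun (a0, a1, a2) =>
    [a0, a1, a2].map (fun a =>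
      [([] : List String), pvTtt].map (fun g =>
        PySem.Str.join "\n" ((a ++ g ++ pvGeneral).map (fun r => "- " ++ r))))

def extract_code_requirements_py_alt (task : String) : String :=
  let t := PySem.Str.lower task
  let a : Nat :=
    if PySem.Str.isIn "mcts" t || PySem.Str.isIn "monte carlo tree search" t then 1
    else if PySem.Str.isIn "minimax" t then 2 else 0
  let g : Nat := if PySem.Str.isIn "tic-tac-toe" t then 1 else 0
  (pvTable.getD a []).getD g ""   -- _TABLE[a][g]; indices are always in range

-- ===== PRECONDITION & SPEC =====
def Spec_extract_code_requirements_py (task : String) (out : String) : Prop := out = extract_code_requirements_py_alt task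
instance (task : String) (out : String) : Decidable (Spec_extract_code_requirements_py task out) := by unfold Spec_extract_code_requirements_py; infer_instance

-- ===== CLAIM (what is proved, stated in full; the proofs are below) =====
def Claim_equal_extract_code_requirements_py : Prop := ∀ (task : String), Dom_extract_code_requirements_py task → Spec_extract_code_requirements_py task (extract_code_requirements_py task)

-- ===== LEMMAS AND PROOFS =====

-- ===== VERDICT (by name: the statement is the Claim_ definition above) =====
theorem extract_code_requirements_py_spec : Claim_equal_extract_code_requirements_py := by
  intro task _
  unfold Spec_extract_code_requirements_py extract_code_requirements_py extract_code_requirements_py_alt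
  simp only [pvTable, pvMcts, pvMinimax, pvTtt, pvGeneral, List.map, List.getD]
  by_cases h1 : PySem.Str.isIn "mcts" (PySem.Str.lower task) = true <;>
  by_cases h2 : PySem.Str.isIn "monte carlo tree search" (PySem.Str.lower task) = true <;>
  by_cases h3 : PySem.Str.isIn "minimax" (PySem.Str.lower task) = true <;>
  by_cases h4 : PySem.Str.isIn "tic-tac-toe" (PySem.Str.lower task) = true <;>
  simp at h1 h2 h3 h4 <;>
  simp [h1, h2, h3, h4]
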